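-- pv_equiv track=rewrite | github.com/DakotaNelson/sneaky-creeper | encoders/lendianSteganography.py | decodeChar
-- ===== SOURCE A (Python) =====
-- def decodeChar(data_8bit):
--     bits = []
--     for i in data_8bit:
--         bits.append( i & 1 )
--
--     # Have to reverse bit set because of
--     # how it was converted before
--     bits = bits[::-1]
--
--     # Convert to char
--     char = 0
--     for i in bits:
--         char = char << 1
--         if i == 0:
--             char = char & ~1
--         else:
--             char = char | 1
--
--     char = chr(char)
--     return char
-- ===== SOURCE B (Python) =====
-- def decodeChar(data_8bit):
--     # Single pass: the i-th element's LSB has weight 2**i (first element is the LSB),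
--     # so no intermediate bit list and no reversal are needed.
--     char = 0
--     for idx, elem in enumerate(data_8bit):
--         char |= (elem & 1) << idx
--     return chr(char)
-- ===== Notes on version B (the rewrite author's own statement) =====
-- stated objective: simpler
-- what changed: B replaces A's three phases (collect LSBs into a list, reverse it, shift-accumulate MSB-first) by one enumerate pass that ORs each LSB directly into its positional weight, eliminating the intermediate list and the reversal.
import Mathlib
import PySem

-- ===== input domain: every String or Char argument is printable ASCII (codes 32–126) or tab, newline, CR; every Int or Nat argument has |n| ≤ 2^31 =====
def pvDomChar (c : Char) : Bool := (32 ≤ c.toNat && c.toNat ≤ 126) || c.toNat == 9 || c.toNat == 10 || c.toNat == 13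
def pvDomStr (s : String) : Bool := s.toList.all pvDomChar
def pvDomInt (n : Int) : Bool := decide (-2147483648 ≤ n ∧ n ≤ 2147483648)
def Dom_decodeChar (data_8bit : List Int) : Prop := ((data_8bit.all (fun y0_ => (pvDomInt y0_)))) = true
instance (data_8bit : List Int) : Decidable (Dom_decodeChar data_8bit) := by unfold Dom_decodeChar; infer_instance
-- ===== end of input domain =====

-- decodeChar: B replaces A's collect-LSBs / reverse / MSB-first shift-accumulate by a single
-- enumerate pass that ORs each LSB into its positional weight (objective: simpler).


-- ===== PORT A =====
-- loop body of 'for i in bits: char = char << 1; …' (kept as a named helper)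
def pvStepA (char : Int) (i : Int) : Int :=
  let char := char <<< (1 : Nat)  -- shift amount is a Nat in Lean
  if i == 0 then PySem.Int.band char (Int.not 1) else PySem.Int.bor char 1

def decodeChar (data_8bit : List Int) : String :=
  -- bits = [i & 1 for i ...]
  let bits := data_8bit.map (fun i => PySem.Int.band i 1)
  -- bits = bits[::-1]  (full negative-step slice = reverse, exact)
  let bits := bits.reverse
  let char : Int := bits.foldl pvStepA 0
  -- chr(char): exact on Pre_ (char is then a valid code point)
  String.ofList [Char.ofNat char.toNat]

-- ===== PORT B =====
-- loop body of 'for idx, elem in enumerate(...): char |= (elem & 1) << idx'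
-- (idx from enumerate is nonnegative, so .toNat is exact)
def pvStepB (char : Int) (p : Int × Int) : Int :=
  PySem.Int.bor char ((PySem.Int.band p.2 1) <<< p.1.toNat)

def decodeChar_alt (data_8bit : List Int) : String :=
  let char : Int := (PySem.List.enumerate data_8bit 0).foldl pvStepB 0
  -- chr(char): exact on Pre_ (char is then a valid code point)
  String.ofList [Char.ofNat char.toNat]

-- ===== PRECONDITION & SPEC =====
-- the code point both programs decode: the i-th element's LSB with weight 2^i
def pvCode : List Int → Nat
  | [] => 0
  | i :: rest => (PySem.Int.mod i 2).toNat + 2 * pvCode rest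

-- Pre_ excludes inputs whose decoded code point is ≥ 0x110000 (chr raises ValueError in BOTH
-- programs) or a UTF-16 surrogate 0xD800–0xDFFF (Python returns a lone-surrogate string that a
-- Lean String/Char cannot represent); only lists of length ≥ 16 can be affected.
def Pre_decodeChar (data_8bit : List Int) : Prop :=
  pvCode data_8bit < 55296 ∨ (57344 ≤ pvCode data_8bit ∧ pvCode data_8bit < 1114112)
instance (data_8bit : List Int) : Decidable (Pre_decodeChar data_8bit) := by
  unfold Pre_decodeChar; infer_instance

def pvWitness_decodeChar : List Int := [1, 0, 0, 0, 0, 0, 1]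

def Spec_decodeChar (data_8bit : List Int) (out : String) : Prop := out = decodeChar_alt data_8bit
instance (data_8bit : List Int) (out : String) : Decidable (Spec_decodeChar data_8bit out) := by
  unfold Spec_decodeChar; infer_instance

-- ===== CLAIM (what is proved, stated in full; the proofs are below) =====
def Claim_equal_decodeChar : Prop := ∀ (data_8bit : List Int), Dom_decodeChar data_8bit → Pre_decodeChar data_8bit → Spec_decodeChar data_8bit (decodeChar data_8bit)

-- ===== LEMMAS AND PROOFS =====

theorem pv_band_one (i : Int) :
    PySem.Int.band i 1 = (((PySem.Int.mod i 2).toNat : Nat) : Int) := by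
  rw [PySem.Int.band_one, Int.toNat_of_nonneg (PySem.Int.mod_nonneg i (by norm_num))]

theorem pv_band_even_not_one (n : Nat) :
    PySem.Int.band ((2 * n : Nat) : Int) (Int.not 1) = ((2 * n : Nat) : Int) := by
  have h2 : Int.not 1 = -2 := by decide
  rw [h2]
  simp [PySem.Int.band, Nat.and_one_is_mod]
  omega

theorem pv_bor_even_one (n : Nat) :
    PySem.Int.bor ((2 * n : Nat) : Int) 1 = ((2 * n + 1 : Nat) : Int) := by
  rw [show ((1 : Int)) = ((1 : Nat) : Int) by norm_num,
      PySem.Int.bor_natCast]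
  have : (2 * n) ||| 1 = 2 * n + 1 := by
    have := Nat.lor_bit false n true 0
    simpa [Nat.bit_false_apply, Nat.bit_true_apply] using this
  rw [this]

theorem pv_or_shift (k : Nat) : ∀ m b : Nat, m < 2 ^ k → b ≤ 1 → m ||| (b <<< k) = m + b * 2 ^ k := by
  induction k with
  | zero => intro m b hm hb; interval_cases m; simp [Nat.shiftLeft_eq]
  | succ k ih =>
    intro m b hm hb
    have hd : Nat.bit (m.testBit 0) (m >>> 1) = m := Nat.bit_testBit_zero_shiftRight_one m
    have hs : b <<< (k + 1) = Nat.bit false (b <<< k) := by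
      simp [Nat.bit_false_apply, Nat.shiftLeft_succ]
    have hlt : m >>> 1 < 2 ^ k := by
      rw [Nat.shiftRight_one]; rw [pow_succ] at hm; omega
    have h0 : (m.testBit 0).toNat = m % 2 := by
      rw [Nat.testBit_zero]
      rcases Nat.mod_two_eq_zero_or_one m with h | h <;> simp [h]
    calc m ||| (b <<< (k + 1))
        = Nat.bit (m.testBit 0) (m >>> 1) ||| Nat.bit false (b <<< k) := by rw [hd, hs]
      _ = Nat.bit (m.testBit 0 || false) ((m >>> 1) ||| (b <<< k)) := Nat.lor_bit ..
      _ = Nat.bit (m.testBit 0) ((m >>> 1) + b * 2 ^ k) := by rw [Bool.or_false, ih _ _ hlt hb]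
      _ = m + b * 2 ^ (k + 1) := by
          rw [Nat.bit_val, Nat.shiftRight_one, h0]
          have hr : b * 2 ^ (k + 1) = 2 * (b * 2 ^ k) := by ring
          rw [hr]; omega

theorem pv_bit_le (i : Int) : (PySem.Int.mod i 2).toNat ≤ 1 := by
  have := PySem.Int.mod_lt i (b := 2) (by norm_num)
  omega

-- A's loop over the reversed LSB list computes pvCode
theorem pv_A_loop (xs : List Int) :
    ((xs.map (fun i => PySem.Int.band i 1)).reverse).foldl pvStepA 0 = ((pvCode xs : Nat) : Int) := by
  induction xs with
  | nil => simp [pvCode]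
  | cons x rest ih =>
    simp only [List.map_cons, List.reverse_cons, List.foldl_append, List.foldl_cons,
      List.foldl_nil, ih]
    show pvStepA ((pvCode rest : Nat) : Int) (PySem.Int.band x 1) = _
    rw [pv_band_one]
    unfold pvStepA
    have hsh : ((pvCode rest : Nat) : Int) <<< (1 : Nat) = ((2 * pvCode rest : Nat) : Int) := by
      rw [Int.shiftLeft_eq]; push_cast; ring
    rcases Nat.le_one_iff_eq_zero_or_eq_one.mp (pv_bit_le x) with h | h
    · rw [h]
      dsimp only
      rw [hsh, if_pos (show ((((0 : Nat) : Int)) == 0) = true by decide), pv_band_even_not_one]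
      have hc : pvCode (x :: rest) = 2 * pvCode rest := by simp only [pvCode, h]; omega
      rw [hc]
    · rw [h]
      dsimp only
      rw [hsh, if_neg (show ¬ ((((1 : Nat) : Int)) == 0) = true by decide), pv_bor_even_one]
      have hc : pvCode (x :: rest) = 2 * pvCode rest + 1 := by simp only [pvCode, h]; omega
      rw [hc]

-- B's enumerate loop, generalized over the start index and an accumulator below 2^k
theorem pv_B_loop (xs : List Int) : ∀ (k c : Nat), c < 2 ^ k →
    (PySem.List.enumerate xs ((k : Nat) : Int)).foldl pvStepB ((c : Nat) : Int)
      = ((c + pvCode xs * 2 ^ k : Nat) : Int) := by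
  induction xs with
  | nil => intro k c _; simp [PySem.List.enumerate_nil, pvCode]
  | cons x rest ih =>
    intro k c hc
    rw [PySem.List.enumerate_cons]
    simp only [List.foldl_cons]
    have hstep : pvStepB ((c : Nat) : Int) (((k : Nat) : Int), x)
        = (((c + (PySem.Int.mod x 2).toNat * 2 ^ k : Nat) : Nat) : Int) := by
      unfold pvStepB
      simp only [pv_band_one]
      rw [show ((((k : Nat) : Int), x) : Int × Int).1.toNat = k by simp]
      have hsh : (((PySem.Int.mod x 2).toNat : Nat) : Int) <<< k
          = ((((PySem.Int.mod x 2).toNat <<< k : Nat) : Nat) : Int) := by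
        rw [Int.shiftLeft_eq, Nat.shiftLeft_eq]; push_cast; ring
      rw [hsh, PySem.Int.bor_natCast, pv_or_shift k c _ hc (pv_bit_le x)]
    rw [hstep]
    have hk1 : (((k : Nat) : Int) + 1) = (((k + 1 : Nat) : Nat) : Int) := by push_cast; ring
    rw [hk1, ih (k + 1) (c + (PySem.Int.mod x 2).toNat * 2 ^ k)
      (by have := pv_bit_le x; rw [pow_succ]; nlinarith)]
    congr 1
    show c + (PySem.Int.mod x 2).toNat * 2 ^ k + pvCode rest * 2 ^ (k + 1)
        = c + pvCode (x :: rest) * 2 ^ k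
    simp [pvCode]; ring

-- ===== VERDICT (by name: the statement is the Claim_ definition above) =====
theorem decodeChar_spec : Claim_equal_decodeChar := by
  intro data _ _
  unfold Spec_decodeChar decodeChar decodeChar_alt
  dsimp only
  have hA := pv_A_loop data
  have hB := pv_B_loop data 0 0 (by norm_num)
  simp only at hA
  rw [hA]
  rw [show ((0 : Nat) : Int) = (0 : Int) by norm_num] at hB
  simp only [pow_zero, mul_one, Nat.zero_add] at hB
  rw [hB]
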